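-- pv_equiv track=rewrite | github.com/realcopacetic/script.copacetic.helper | resources/lib/shared/parser.py | _iter_script_pairs
-- ===== SOURCE A (Python) =====
-- from typing import Iterable, Iterator
--
-- def _iter_script_pairs(tokens: Iterable[str]) -> Iterator[tuple[str, str]]:
--     """
--     Yield (key, value) pairs from RunScript tokens, stitching comma fragments.
--     ['action=foo', 'name=Greatest Hits', ' Vol. 2']  →  ('name', 'Greatest Hits, Vol. 2')
--
--     :param tokens: Iterable of raw RunScript tokens (typically argv[1:]).
--     :yields: (key, value) pairs with comma-split fragments re-joined.
--     """
--     cur_key = None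
--     cur_val = ""
--     for tok in tokens:
--         if not tok:
--             continue
--         if "=" in tok:
--             if cur_key is not None:
--                 yield cur_key, cur_val
--             cur_key, cur_val = tok.split("=", 1)
--         else:
--             if cur_key is not None:
--                 cur_val = f"{cur_val},{tok}"
--     if cur_key is not None:
--         yield cur_key, cur_val
-- ===== SOURCE B (Python) =====
-- from typing import Iterable, Iterator
--
-- def _iter_script_pairs(tokens: Iterable[str]) -> Iterator[tuple[str, str]]:
--     """Group-then-emit: first collect fragment groups, then yield joined pairs."""
--     groups: list[list[str]] = []
--     for tok in tokens:
--         if not tok: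
--             continue
--         if "=" in tok:
--             groups.append([tok])
--         elif groups:
--             groups[-1].append(tok)
--     for g in groups:
--         key, val0 = g[0].split("=", 1)
--         yield key, ",".join([val0] + g[1:])
-- ===== Notes on version B (the rewrite author's own statement) =====
-- stated objective: alternative
-- what changed: A streams with mutable cur_key/cur_val state and yields on-the-fly; B first builds a list of fragment groups (new group on '=' token, append otherwise) and then, in a separate pass, splits each group head once and joins its fragments with ','.
import Mathlib
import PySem

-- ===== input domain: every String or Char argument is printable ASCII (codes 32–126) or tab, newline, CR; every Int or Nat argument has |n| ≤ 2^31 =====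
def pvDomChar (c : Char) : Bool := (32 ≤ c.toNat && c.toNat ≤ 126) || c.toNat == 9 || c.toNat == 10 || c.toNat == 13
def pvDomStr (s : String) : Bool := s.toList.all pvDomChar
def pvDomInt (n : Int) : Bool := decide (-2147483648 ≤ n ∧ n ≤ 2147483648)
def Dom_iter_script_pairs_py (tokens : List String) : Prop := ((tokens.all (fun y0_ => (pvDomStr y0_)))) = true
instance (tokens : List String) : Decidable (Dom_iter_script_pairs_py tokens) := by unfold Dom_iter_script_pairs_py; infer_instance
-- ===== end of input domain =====

-- B replaces A's streaming cur_key/cur_val state machine by a build-groups-then-emit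
-- decomposition (objective: alternative; same linear cost, return value proved equal).

-- ===== PORT A =====
-- tok.split("=", 1): both Pythons only call it when "=" is in tok, so the split has
-- exactly two parts and the fallback branches below are unreachable there.
def pvSplitEq (tok : String) : String × String :=
  match PySem.Str.splitMax? tok "=" 1 with
  | some (k :: v :: _) => (k, v)
  | _ => ("", "")

-- the generator loop of A: state cur_key (None = no key yet) and cur_val
def pvGoA (ck : Option String) (cv : String) : List String → List (String × String)
  | [] => (match ck with | none => [] | some k => [(k, cv)])
  | t :: ts =>
    if t = "" then pvGoA ck cv ts
    else if PySem.Str.isIn "=" t then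
      match ck with
      | none => pvGoA (some (pvSplitEq t).1) (pvSplitEq t).2 ts
      | some k => (k, cv) :: pvGoA (some (pvSplitEq t).1) (pvSplitEq t).2 ts
    else
      match ck with
      | none => pvGoA none cv ts
      | some k => pvGoA (some k) (cv ++ "," ++ t) ts

def iter_script_pairs_py (tokens : List String) : List (String × String) :=
  pvGoA none "" tokens

-- ===== PORT B =====
-- groups[-1].append(tok) (callers guarantee the list is nonempty; [] case is unreachable)
def pvAppendLast : List (List String) → String → List (List String)
  | [], _ => []
  | [g], t => [g ++ [t]]
  | g :: h :: gs, t => g :: pvAppendLast (h :: gs) t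

-- first pass of B: collect the fragment groups
def pvGroups (gs : List (List String)) : List String → List (List String)
  | [] => gs
  | t :: ts =>
    if t = "" then pvGroups gs ts
    else if PySem.Str.isIn "=" t then pvGroups (gs ++ [[t]]) ts
    else if gs.isEmpty then pvGroups gs ts
    else pvGroups (pvAppendLast gs t) ts

-- second pass of B: split the head once, join the fragments ([] is unreachable: every group is built nonempty)
def pvEmit : List String → String × String
  | [] => ("", "")
  | h :: rest => ((pvSplitEq h).1, PySem.Str.join "," ((pvSplitEq h).2 :: rest))

def iter_script_pairs_py_alt (tokens : List String) : List (String × String) :=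
  (pvGroups [] tokens).map pvEmit

-- ===== PRECONDITION & SPEC =====
def Spec_iter_script_pairs_py (tokens : List String) (out : List (String × String)) : Prop := out = iter_script_pairs_py_alt tokens
instance (tokens : List String) (out : List (String × String)) : Decidable (Spec_iter_script_pairs_py tokens out) := by unfold Spec_iter_script_pairs_py; infer_instance

-- ===== CLAIM (what is proved, stated in full; the proofs are below) =====
def Claim_equal_iter_script_pairs_py : Prop := ∀ (tokens : List String), Dom_iter_script_pairs_py tokens → Spec_iter_script_pairs_py tokens (iter_script_pairs_py tokens)

-- ===== LEMMAS AND PROOFS =====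

theorem pvChars_join_app (sep : List Char) (x : List Char) (l : List (List Char)) (t : List Char) :
    PySem.Chars.join sep ((x :: l) ++ [t]) = PySem.Chars.join sep (x :: l) ++ sep ++ t := by
  induction l generalizing x with
  | nil => simp [PySem.Chars.join_cons_cons, PySem.Chars.join_singleton]
  | cons y ys ih =>
    simp only [List.cons_append, PySem.Chars.join_cons_cons]
    rw [← List.cons_append, ih y]
    simp

theorem pvStr_join_app (x : String) (l : List String) (t : String) :
    PySem.Str.join "," ((x :: l) ++ [t]) = PySem.Str.join "," (x :: l) ++ "," ++ t := by
  apply String.toList_inj.mp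
  simp only [PySem.Str.toList_join, List.map_append, List.map_cons, List.map_nil, String.toList_append]
  exact pvChars_join_app _ _ _ _

theorem pvStr_join_singleton (s : String) : PySem.Str.join "," [s] = s := by
  simp [PySem.Str.join, PySem.Chars.join, List.intercalate]

theorem pvAppendLast_ne_nil (b : List (List String)) (hb : b ≠ []) (t : String) :
    pvAppendLast b t ≠ [] := by
  match b with
  | [g] => simp [pvAppendLast]
  | g :: h :: gs => simp [pvAppendLast]

theorem pvAppendLast_append (a b : List (List String)) (hb : b ≠ []) (t : String) :
    pvAppendLast (a ++ b) t = a ++ pvAppendLast b t := by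
  induction a with
  | nil => rfl
  | cons x a ih =>
    obtain ⟨c, b', rfl⟩ : ∃ c b', b = c :: b' := by
      cases b with
      | nil => exact absurd rfl hb
      | cons c b' => exact ⟨c, b', rfl⟩
    cases a with
    | nil => rfl
    | cons d l =>
      show pvAppendLast (x :: d :: (l ++ c :: b')) t = _
      rw [pvAppendLast]
      rw [show (d :: (l ++ c :: b')) = ((d :: l) ++ c :: b') from rfl, ih]
      rfl

theorem pvGroups_append (ts : List String) : ∀ (a b : List (List String)), b ≠ [] →
    pvGroups (a ++ b) ts = a ++ pvGroups b ts := by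
  induction ts with
  | nil => intro a b _; rfl
  | cons t ts ih =>
    intro a b hb
    rw [pvGroups, pvGroups]
    by_cases ht : t = ""
    · simp [ht, ih a b hb]
    · simp only [ht, if_false]
      by_cases he : PySem.Str.isIn "=" t = true
      · simp only [he, if_true]
        rw [List.append_assoc]
        exact ih a (b ++ [[t]]) (by simp)
      · simp only [he]
        have h1 : (a ++ b).isEmpty = false := by simp [hb]
        have h2 : b.isEmpty = false := by simp [hb]
        simp only [h1, h2, Bool.false_eq_true, if_false]
        rw [pvAppendLast_append a b hb t]
        exact ih a (pvAppendLast b t) (pvAppendLast_ne_nil b hb t)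

theorem pvMain_open (ts : List String) : ∀ (h : String) (frags : List String),
    pvGoA (some (pvSplitEq h).1) (PySem.Str.join "," ((pvSplitEq h).2 :: frags)) ts
      = (pvGroups [h :: frags] ts).map pvEmit := by
  induction ts with
  | nil => intro h frags; rfl
  | cons t ts ih =>
    intro h frags
    rw [pvGoA, pvGroups]
    by_cases ht : t = ""
    · simp [ht, ih h frags]
    · simp only [ht, if_false]
      by_cases he : PySem.Str.isIn "=" t = true
      · simp only [he, if_true]
        rw [pvGroups_append ts [h :: frags] [[t]] (by simp)]
        rw [List.map_append]
        have : pvGoA (some (pvSplitEq t).1) (pvSplitEq t).2 ts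
            = (pvGroups [[t]] ts).map pvEmit := by
          have := ih t []
          rwa [pvStr_join_singleton] at this
        rw [this]
        rfl
      · simp only [he]
        have hlast : pvAppendLast [h :: frags] t = [h :: (frags ++ [t])] := by
          simp [pvAppendLast]
        rw [hlast]
        have hcv : PySem.Str.join "," ((pvSplitEq h).2 :: frags) ++ "," ++ t
            = PySem.Str.join "," ((pvSplitEq h).2 :: (frags ++ [t])) := by
          rw [← pvStr_join_app]
          rfl
        rw [hcv]
        exact ih h (frags ++ [t])

theorem pvMain_none (ts : List String) : ∀ (cv : String),
    pvGoA none cv ts = (pvGroups [] ts).map pvEmit := by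
  induction ts with
  | nil => intro cv; rfl
  | cons t ts ih =>
    intro cv
    rw [pvGoA, pvGroups]
    by_cases ht : t = ""
    · simp [ht, ih cv]
    · simp only [ht, if_false]
      by_cases he : PySem.Str.isIn "=" t = true
      · simp only [he, if_true]
        have := pvMain_open ts t []
        rw [pvStr_join_singleton] at this
        rw [this]
        rfl
      · simp only [he]
        exact ih cv

-- ===== VERDICT (by name: the statement is the Claim_ definition above) =====
theorem iter_script_pairs_py_spec : Claim_equal_iter_script_pairs_py := by
  intro tokens _
  unfold Spec_iter_script_pairs_py iter_script_pairs_py iter_script_pairs_py_alt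
  exact pvMain_none tokens ""
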